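-- pv_equiv track=rewrite | github.com/mssinternetmarketing-cyber/PEIG_Brotherhood | ArXivSubmission20MostImportant/LearningTask1/PEIG_LT1_learning_task1.py | is_original
-- ===== SOURCE A (Python) =====
-- def is_original(program, training_corpus):
--     """Check if program is genuinely different from all training examples."""
--     prog_str = " ".join(program)
--     for tp in training_corpus:
--         train_str = " ".join(tp)
--         if prog_str == train_str: return False
--         # Check for substring match (program is not a slice of a training program)
--         if len(program) > 3:
--             for start in range(len(tp) - len(program) + 1):
--                 if tp[start:start+len(program)] == program:
--                     return False
--     return True
-- ===== SOURCE B (Python) =====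
-- def is_original(program, training_corpus):
--     """Check if program is genuinely different from all training examples."""
--     prog_str = " ".join(program)
--     n = len(program)
--     # Tokens are text (no NUL byte), so a NUL-delimited join with sentinels at both
--     # ends makes "contiguous token-sublist" exactly one string containment test,
--     # answered by Python's C-level two-way substring search.
--     needle = "\x00".join([""] + program + [""]) if n > 3 else None
--     for tp in training_corpus:
--         if " ".join(tp) == prog_str:
--             return False
--         if n > 3 and needle in "\x00".join([""] + tp + [""]):
--             return False
--     return True
-- ===== Notes on version B (the rewrite author's own statement) =====
-- stated objective: alternative
-- what changed: B replaces the per-start sliding-window slice comparison with a single sentinel-delimited string containment test: tokens contain no NUL, so 'program is a contiguous token-sublist of tp' becomes one "\x00"-join plus Python's C-level two-way substring search.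
import Mathlib
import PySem

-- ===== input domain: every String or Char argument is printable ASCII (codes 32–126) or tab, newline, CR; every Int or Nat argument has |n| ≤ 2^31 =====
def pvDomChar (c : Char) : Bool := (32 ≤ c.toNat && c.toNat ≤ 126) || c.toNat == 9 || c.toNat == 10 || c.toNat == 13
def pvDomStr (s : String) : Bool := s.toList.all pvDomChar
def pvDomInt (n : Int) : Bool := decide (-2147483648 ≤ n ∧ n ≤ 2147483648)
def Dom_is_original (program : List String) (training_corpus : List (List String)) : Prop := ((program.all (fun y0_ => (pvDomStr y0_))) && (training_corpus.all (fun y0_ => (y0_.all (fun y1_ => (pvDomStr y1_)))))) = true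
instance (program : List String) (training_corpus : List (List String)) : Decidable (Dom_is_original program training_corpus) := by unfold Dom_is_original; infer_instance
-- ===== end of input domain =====

-- B replaces the per-start sliding-window slice comparison with one sentinel-delimited
-- string containment test per training example (tokens are NUL-free text, so a
-- "\x00"-join with sentinels makes token-sublist search exact); same return value.

-- ===== PORT A =====
def is_original (program : List String) (training_corpus : List (List String)) : Bool :=
  let prog_str := PySem.Str.join " " program
  training_corpus.all (fun tp =>
    let train_str := PySem.Str.join " " tp
    !(prog_str == train_str) &&
    (if 3 < program.length then
       !((PySem.List.pyRange 0 ((tp.length : Int) - program.length + 1) 1).any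
           (fun start =>
             PySem.List.slice tp (some start) (some (start + program.length)) == program))
     else true))

-- ===== PORT B =====
def is_original_alt (program : List String) (training_corpus : List (List String)) : Bool :=
  let prog_str := PySem.Str.join " " program
  let n := program.length
  let needle := PySem.Str.join "\x00" ([""] ++ program ++ [""])
  training_corpus.all (fun tp =>
    if PySem.Str.join " " tp == prog_str then false
    else if 3 < n then
      !(PySem.Str.isIn needle (PySem.Str.join "\x00" ([""] ++ tp ++ [""])))
    else true)

-- ===== PRECONDITION & SPEC =====
def Spec_is_original (program : List String) (training_corpus : List (List String)) (out : Bool) : Prop := out = is_original_alt program training_corpus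
instance (program : List String) (training_corpus : List (List String)) (out : Bool) : Decidable (Spec_is_original program training_corpus out) := by unfold Spec_is_original; infer_instance

-- ===== CLAIM (what is proved, stated in full; the proofs are below) =====
def Claim_equal_is_original : Prop := ∀ (program : List String) (training_corpus : List (List String)), Dom_is_original program training_corpus → Spec_is_original program training_corpus (is_original program training_corpus)

-- ===== LEMMAS AND PROOFS =====

-- The NUL sentinel and the NUL-terminated-chunk encoding "\x00".join([""]+l+[""]) = '\x00' :: gEnc l.
def pvNul : Char := '\x00'

def gEnc (l : List (List Char)) : List Char := (l.map (fun t => t ++ [pvNul])).flatten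

lemma gEnc_nil : gEnc [] = [] := rfl

lemma gEnc_cons (t : List Char) (l : List (List Char)) :
    gEnc (t :: l) = t ++ pvNul :: gEnc l := by
  simp [gEnc]

lemma gEnc_append (a b : List (List Char)) : gEnc (a ++ b) = gEnc a ++ gEnc b := by
  simp [gEnc]

lemma join_tail (l : List (List Char)) :
    PySem.Chars.join [pvNul] (l ++ [[]]) = gEnc l := by
  induction l with
  | nil => simp [PySem.Chars.join_singleton, gEnc_nil]
  | cons t l ih =>
    cases l with
    | nil =>
      simp [PySem.Chars.join_cons_cons, PySem.Chars.join_singleton, gEnc_cons, gEnc_nil]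
    | cons u l' =>
      rw [show (t :: (u :: l')) ++ [[]] = t :: u :: (l' ++ [[]]) from rfl,
        PySem.Chars.join_cons_cons, show u :: (l' ++ [[]]) = (u :: l') ++ [[]] from rfl,
        ih, gEnc_cons]
      simp [gEnc_cons]

lemma enc_eq (l : List (List Char)) :
    PySem.Chars.join [pvNul] ([] :: (l ++ [[]])) = pvNul :: gEnc l := by
  have h := join_tail l
  obtain ⟨q, rest, hl⟩ : ∃ q rest, l ++ [[]] = q :: rest := by
    cases l <;> exact ⟨_, _, rfl⟩
  rw [hl] at h
  rw [hl, PySem.Chars.join_cons_cons, h]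
  simp

def NulFree (l : List (List Char)) : Prop := ∀ t ∈ l, pvNul ∉ t

-- A NUL inside a NUL-terminated-chunk concatenation splits only at chunk boundaries (chunk level).
lemma eq_core (t : List Char) (u z w : List Char) (ht : pvNul ∉ t)
    (h : t ++ pvNul :: z = u ++ pvNul :: w) :
    (u = t ∧ w = z) ∨ ∃ u', u = t ++ pvNul :: u' ∧ z = u' ++ pvNul :: w := by
  induction t generalizing u with
  | nil =>
    cases u with
    | nil => left; simp_all
    | cons c u' =>
      right
      simp only [List.nil_append, List.cons_append] at h
      obtain ⟨rfl, h2⟩ := List.cons.inj h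
      exact ⟨u', by simp, h2⟩
  | cons c t' ih =>
    cases u with
    | nil =>
      simp only [List.cons_append, List.nil_append] at h
      obtain ⟨rfl, -⟩ := List.cons.inj h
      exact absurd (List.mem_cons_self) ht
    | cons d u' =>
      simp only [List.cons_append] at h
      obtain ⟨rfl, h2⟩ := List.cons.inj h
      have ht' : pvNul ∉ t' := fun hm => ht (List.mem_cons_of_mem _ hm)
      rcases ih _ ht' h2 with ⟨rfl, rfl⟩ | ⟨u'', rfl, rfl⟩
      · exact Or.inl ⟨rfl, rfl⟩
      · exact Or.inr ⟨u'', by simp, rfl⟩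

-- Two NUL-free chunks followed by NUL: a prefix relation forces chunk equality.
lemma pref_core (p : List Char) (t x y : List Char) (hp : pvNul ∉ p) (ht : pvNul ∉ t)
    (h : p ++ pvNul :: x <+: t ++ pvNul :: y) : p = t ∧ x <+: y := by
  induction p generalizing t with
  | nil =>
    cases t with
    | nil =>
      simp only [List.nil_append, List.cons_prefix_cons] at h
      exact ⟨rfl, h.2⟩
    | cons d t' =>
      simp only [List.nil_append, List.cons_append, List.cons_prefix_cons] at h
      exact absurd (h.1 ▸ List.mem_cons_self) ht
  | cons c p' ih =>
    cases t with
    | nil =>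
      simp only [List.cons_append, List.nil_append, List.cons_prefix_cons] at h
      exact absurd (h.1 ▸ List.mem_cons_self) hp
    | cons d t' =>
      simp only [List.cons_append, List.cons_prefix_cons] at h
      obtain ⟨rfl, h2⟩ := h
      have hp' : pvNul ∉ p' := fun hm => hp (List.mem_cons_of_mem _ hm)
      have ht' : pvNul ∉ t' := fun hm => ht (List.mem_cons_of_mem _ hm)
      obtain ⟨rfl, h3⟩ := ih _ hp' ht' h2
      exact ⟨rfl, h3⟩

lemma gEnc_prefix (P T : List (List Char)) (hP : NulFree P) (hT : NulFree T)
    (h : gEnc P <+: gEnc T) : P <+: T := by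
  induction P generalizing T with
  | nil => exact List.nil_prefix
  | cons p P' ih =>
    cases T with
    | nil =>
      rw [gEnc_cons, gEnc_nil, List.prefix_nil] at h
      simp at h
    | cons t T' =>
      rw [gEnc_cons, gEnc_cons] at h
      obtain ⟨rfl, h2⟩ := pref_core p t _ _ (hP p List.mem_cons_self) (hT t List.mem_cons_self) h
      have hP' : NulFree P' := fun s hs => hP s (List.mem_cons_of_mem _ hs)
      have hT' : NulFree T' := fun s hs => hT s (List.mem_cons_of_mem _ hs)
      exact List.cons_prefix_cons.mpr ⟨rfl, ih _ hP' hT' h2⟩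

-- Every NUL in gEnc T is a chunk boundary.
lemma gEnc_boundary (T : List (List Char)) (u w : List Char) (hT : NulFree T)
    (h : gEnc T = u ++ pvNul :: w) :
    ∃ a b, T = a ++ b ∧ gEnc a = u ++ [pvNul] ∧ gEnc b = w := by
  induction T generalizing u with
  | nil => rw [gEnc_nil] at h; simp at h
  | cons t T' ih =>
    rw [gEnc_cons] at h
    have hT' : NulFree T' := fun s hs => hT s (List.mem_cons_of_mem _ hs)
    rcases eq_core t u (gEnc T') w (hT t List.mem_cons_self) h with ⟨h1, h2⟩ | ⟨u', h1, h2⟩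
    · refine ⟨[t], T', rfl, ?_, h2.symm⟩
      rw [h1]
      simp [gEnc_cons, gEnc_nil]
    · obtain ⟨a', b', rfl, ha', hb'⟩ := ih _ hT' h2
      refine ⟨t :: a', b', rfl, ?_, hb'⟩
      rw [gEnc_cons, ha', h1]
      simp

lemma gEnc_ends (a : List (List Char)) (h : a ≠ []) : ∃ u, gEnc a = u ++ [pvNul] := by
  obtain ⟨l, x, rfl⟩ := List.eq_nil_or_concat a |>.resolve_left h
  refine ⟨gEnc l ++ x, ?_⟩
  rw [List.concat_eq_append, gEnc_append, gEnc_cons, gEnc_nil]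
  simp

-- The heart of B's correctness: with NUL sentinels, string containment is token-sublist.
lemma main_iff (P T : List (List Char)) (_hne : P ≠ []) (hP : NulFree P) (hT : NulFree T) :
    (pvNul :: gEnc P <:+: pvNul :: gEnc T) ↔ P <:+: T := by
  constructor
  · rintro ⟨u, v, huv⟩
    cases u with
    | nil =>
      simp only [List.nil_append, List.cons_append] at huv
      obtain ⟨-, h2⟩ := List.cons.inj huv
      exact (gEnc_prefix P T hP hT ⟨v, h2⟩).isInfix
    | cons c u' =>
      simp only [List.cons_append, List.append_assoc] at huv
      obtain ⟨-, h2⟩ := List.cons.inj huv.symm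
      have h3 : gEnc T = u' ++ pvNul :: (gEnc P ++ v) := by
        rw [h2]
      obtain ⟨a, b, rfl, -, hb⟩ := gEnc_boundary T u' _ hT h3
      have hbF : NulFree b := fun s hs => hT s (List.mem_append_right a hs)
      have hPb : P <+: b := gEnc_prefix P b hP hbF ⟨v, hb.symm ▸ rfl⟩
      obtain ⟨r, rfl⟩ := hPb
      exact ⟨a, r, by simp⟩
  · rintro ⟨a, b, rfl⟩
    by_cases ha : a = []
    · subst ha
      refine ⟨[], gEnc b, ?_⟩
      simp [gEnc_append]
    · obtain ⟨u, hu⟩ := gEnc_ends a ha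
      refine ⟨pvNul :: u, gEnc b, ?_⟩
      rw [gEnc_append, gEnc_append, hu]
      simp

-- A's sliding-window any is exactly list-infix (any program length).
lemma anyRange_iff (program tp : List String) :
    ((PySem.List.pyRange 0 ((tp.length : Int) - program.length + 1) 1).any
       (fun start =>
         PySem.List.slice tp (some start) (some (start + program.length)) == program))
    = decide (program <:+: tp) := by
  rw [Bool.eq_iff_iff, decide_eq_true_eq, List.any_eq_true]
  constructor
  · rintro ⟨start, hmem, hmatch⟩
    rw [PySem.List.mem_pyRange_one] at hmem
    obtain ⟨s, rfl⟩ : ∃ s : Nat, start = (s : Int) :=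
      ⟨start.toNat, (Int.toNat_of_nonneg hmem.1).symm⟩
    rw [show ((s : Int) + (program.length : Int)) = ((s : Int) + (program.length : Nat)) from rfl,
      PySem.List.slice_natCast_add, beq_iff_eq] at hmatch
    refine ⟨tp.take s, tp.drop (s + program.length), ?_⟩
    have hdd : tp.drop (s + program.length) = (tp.drop s).drop program.length := by
      rw [List.drop_drop]
    have hsplit : program ++ tp.drop (s + program.length) = tp.drop s := by
      rw [hdd]
      have h0 := List.take_append_drop program.length (tp.drop s)
      rw [hmatch] at h0
      exact h0
    calc tp.take s ++ program ++ tp.drop (s + program.length)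
        = tp.take s ++ (program ++ tp.drop (s + program.length)) := by simp
      _ = tp.take s ++ tp.drop s := by rw [hsplit]
      _ = tp := List.take_append_drop _ _
  · rintro ⟨a, b, rfl⟩
    refine ⟨(a.length : Int), ?_, ?_⟩
    · rw [PySem.List.mem_pyRange_one]
      constructor
      · exact Int.natCast_nonneg _
      · have hlen : (a ++ program ++ b).length = a.length + program.length + b.length := by
          simp [Nat.add_assoc]
        rw [hlen]
        push_cast
        omega
    · rw [show ((a.length : Int) + (program.length : Int)) = ((a.length : Int) + (program.length : Nat)) from rfl,
        PySem.List.slice_natCast_add, beq_iff_eq]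
      rw [List.append_assoc, List.drop_left, List.take_left]

lemma domStr_nulFree (s : String) (h : pvDomStr s = true) : pvNul ∉ s.toList := by
  intro hm
  have := List.all_eq_true.mp h _ hm
  simp [pvDomChar, pvNul] at this

-- B's containment test equals list-infix on NUL-free tokens.
lemma isIn_iff (program tp : List String) (h3 : 3 < program.length)
    (hP : ∀ s ∈ program, pvDomStr s = true) (hT : ∀ s ∈ tp, pvDomStr s = true) :
    PySem.Str.isIn (PySem.Str.join "\x00" ([""] ++ program ++ [""]))
        (PySem.Str.join "\x00" ([""] ++ tp ++ [""]))
    = decide (program <:+: tp) := by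
  have hmap : ∀ (l : List String),
      ([""] ++ l ++ [""]).map String.toList = [] :: (l.map String.toList ++ [[]]) := by
    intro l; simp
  rw [Bool.eq_iff_iff, decide_eq_true_eq, PySem.Str.isIn_iff_infix,
    PySem.Str.toList_join, PySem.Str.toList_join, hmap, hmap,
    show ("\x00" : String).toList = [pvNul] from rfl, enc_eq, enc_eq]
  have hPne : program.map String.toList ≠ [] := by
    intro h
    have hlen : program.length = 0 := by simpa using congrArg List.length h
    omega
  have hPF : NulFree (program.map String.toList) := by
    intro t ht
    obtain ⟨s, hs, rfl⟩ := List.mem_map.mp ht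
    exact domStr_nulFree s (hP s hs)
  have hTF : NulFree (tp.map String.toList) := by
    intro t ht
    obtain ⟨s, hs, rfl⟩ := List.mem_map.mp ht
    exact domStr_nulFree s (hT s hs)
  rw [main_iff _ _ hPne hPF hTF]
  rw [List.infix_map_iff]
  constructor
  · rintro ⟨l, hl, hmapeq⟩
    have : program = l :=
      List.map_injective_iff.mpr (fun a b hab => String.toList_inj.mp hab) hmapeq
    exact this ▸ hl
  · intro h
    exact ⟨program, h, rfl⟩

-- ===== VERDICT (by name: the statement is the Claim_ definition above) =====
theorem is_original_spec : Claim_equal_is_original := by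
  intro program training_corpus hdom
  unfold Spec_is_original
  dsimp only [is_original, is_original_alt]
  rw [Dom_is_original, Bool.and_eq_true, List.all_eq_true, List.all_eq_true] at hdom
  obtain ⟨hP, hC⟩ := hdom
  rw [Bool.eq_iff_iff, List.all_eq_true, List.all_eq_true]
  have key : ∀ tp ∈ training_corpus,
      (!(PySem.Str.join " " program == PySem.Str.join " " tp) &&
        (if 3 < program.length then
          !((PySem.List.pyRange 0 ((tp.length : Int) - program.length + 1) 1).any
              (fun start =>
                PySem.List.slice tp (some start) (some (start + program.length)) == program))
        else true))
      =
      (if PySem.Str.join " " tp == PySem.Str.join " " program then false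
       else if 3 < program.length then
         !(PySem.Str.isIn (PySem.Str.join "\x00" ([""] ++ program ++ [""]))
            (PySem.Str.join "\x00" ([""] ++ tp ++ [""])))
       else true) := by
    intro tp htp
    have hT : ∀ s ∈ tp, pvDomStr s = true := List.all_eq_true.mp (hC tp htp)
    by_cases hjoin : PySem.Str.join " " program = PySem.Str.join " " tp
    · simp [hjoin]
    · have hA : (PySem.Str.join " " program == PySem.Str.join " " tp) = false :=
        beq_eq_false_iff_ne.mpr hjoin
      have hB : (PySem.Str.join " " tp == PySem.Str.join " " program) = false :=
        beq_eq_false_iff_ne.mpr (Ne.symm hjoin)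
      rw [hA, hB]
      simp only [Bool.not_false, Bool.true_and, Bool.false_eq_true, if_false]
      by_cases h3 : 3 < program.length
      · rw [if_pos h3, if_pos h3, anyRange_iff, isIn_iff program tp h3 hP hT]
      · rw [if_neg h3, if_neg h3]
  constructor
  · intro H tp htp
    rw [← key tp htp]
    exact H tp htp
  · intro H tp htp
    rw [key tp htp]
    exact H tp htp
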